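-- pv_equiv track=rewrite | github.com/marcosvsilva/cardiac-pathology | normalization/defs_normalization_ppa.py | classify_ppa
-- ===== SOURCE A (Python) =====
-- normal = 'NORMAL'
--
-- hypertension = 'HAS'
--
-- missing_value = ''
--
-- index_value_height = 'HEIGHT'
--
-- index_value_ppa = 'PPA'
--
-- index_value_ppd = 'PPD'
--
-- interval_percentil = [[0, 5], [5, 10], [10, 25], [25, 50], [50, 75], [75, 90]]
--
-- def classify(value, max_pas, max_pad):
--     result = missing_value
--
--     if value[index_value_ppa] >= max_pas or value[index_value_ppd] >= max_pad:
--         result = hypertension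
--     else:
--         result = normal
--
--     return result
--
-- def classify_ppa(value, interval_max_pas, interval_max_pad):
--     result = missing_value
--     index = -1
--     count = 0
--     max = 0
--
--     for interval in interval_percentil:
--         min = interval[0]
--         max = interval[1]
--
--         if min < value[index_value_height] <= max:
--             index = count
--
--         count += 1
--
--     if value[index_value_height] > max:
--         index = count
--
--     if index >= 0:
--         result = classify(value, interval_max_pas[index], interval_max_pad[index])
--
--     return result
-- ===== SOURCE B (Python) =====
-- # Same classification, but the interval index is found by an inlined binary search
-- # (bisect_left) over the boundary list instead of a stateful linear scan, with early return.
-- boundaries = [0, 5, 10, 25, 50, 75, 90]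
--
--
-- def classify_ppa(value, interval_max_pas, interval_max_pad):
--     h = value['HEIGHT']
--     lo, hi = 0, len(boundaries)
--     while lo < hi:
--         mid = (lo + hi) // 2
--         if boundaries[mid] < h:
--             lo = mid + 1
--         else:
--             hi = mid
--     index = lo - 1
--     if index < 0:
--         return ''
--     if value['PPA'] >= interval_max_pas[index] or value['PPD'] >= interval_max_pad[index]:
--         return 'HAS'
--     return 'NORMAL'
-- ===== Notes on version B (the rewrite author's own statement) =====
-- stated objective: alternative
-- what changed: Replaces A's stateful linear scan over the six percentile intervals (tracking index/count/max plus a post-loop h>max check) by an inlined bisect_left binary search over a single boundary list, with early return.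
import Mathlib
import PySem

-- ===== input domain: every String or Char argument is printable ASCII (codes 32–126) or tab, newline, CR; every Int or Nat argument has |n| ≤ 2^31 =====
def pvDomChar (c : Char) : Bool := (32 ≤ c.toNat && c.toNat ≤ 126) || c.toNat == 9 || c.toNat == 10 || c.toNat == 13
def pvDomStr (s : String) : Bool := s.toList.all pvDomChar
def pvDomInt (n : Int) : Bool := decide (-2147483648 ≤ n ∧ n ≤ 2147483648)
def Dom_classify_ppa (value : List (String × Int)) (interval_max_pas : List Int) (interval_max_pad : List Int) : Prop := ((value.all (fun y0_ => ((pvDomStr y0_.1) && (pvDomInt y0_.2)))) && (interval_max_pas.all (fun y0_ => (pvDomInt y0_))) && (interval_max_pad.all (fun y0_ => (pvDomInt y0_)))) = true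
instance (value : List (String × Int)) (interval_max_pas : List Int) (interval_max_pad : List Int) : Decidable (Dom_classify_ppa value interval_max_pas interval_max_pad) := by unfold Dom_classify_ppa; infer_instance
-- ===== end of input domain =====

-- B finds the percentile-interval index with an inlined bisect_left binary search over one
-- boundary list instead of A's stateful linear scan over interval pairs (objective: alternative).


-- ===== PORT A =====
def intervalPercentil : List (Int × Int) := [(0, 5), (5, 10), (10, 25), (25, 50), (50, 75), (75, 90)]

-- value[k] for the dict argument; KeyError (missing key) is excluded by Pre_, so getD is exact there
def classifyA (value : List (String × Int)) (max_pas : Int) (max_pad : Int) : String :=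
  if PySem.Dict.getD (PySem.Dict.mk value) "PPA" 0 ≥ max_pas ∨
     PySem.Dict.getD (PySem.Dict.mk value) "PPD" 0 ≥ max_pad then "HAS" else "NORMAL"

def classify_ppa (value : List (String × Int)) (interval_max_pas : List Int) (interval_max_pad : List Int) : String :=
  let h := PySem.Dict.getD (PySem.Dict.mk value) "HEIGHT" 0
  -- state (index, count, max) as in A's loop
  let s := intervalPercentil.foldl
    (fun (s : Int × Int × Int) interval =>
      let mn := interval.1
      let mx := interval.2
      (if mn < h ∧ h ≤ mx then s.2.1 else s.1, s.2.1 + 1, mx))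
    (-1, 0, 0)
  let index := if h > s.2.2 then s.2.1 else s.1
  if index ≥ 0 then
    -- list indexing; IndexError excluded by Pre_
    match PySem.List.pyGet? interval_max_pas index, PySem.List.pyGet? interval_max_pad index with
    | some mp, some md => classifyA value mp md
    | _, _ => ""
  else ""

-- ===== PORT B =====
def pvBoundaries : List Int := [0, 5, 10, 25, 50, 75, 90]

-- the while-loop of Source B: bisect_left inlined; mid is always in range, so getD is exact.
-- blGo is the loop body; the fuel hi - lo bounds the iteration count (each step shrinks hi - lo).
def blGo (h : Int) : Nat → Nat → Nat → Nat
  | 0, lo, _ => lo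
  | fuel + 1, lo, hi =>
      if lo < hi then
        let mid := (lo + hi) / 2
        if pvBoundaries.getD mid 0 < h then blGo h fuel (mid + 1) hi
        else blGo h fuel lo mid
      else lo

def bisectLeft (h : Int) (lo hi : Nat) : Nat := blGo h (hi - lo) lo hi

def classify_ppa_alt (value : List (String × Int)) (interval_max_pas : List Int) (interval_max_pad : List Int) : String :=
  let h := PySem.Dict.getD (PySem.Dict.mk value) "HEIGHT" 0
  let index : Int := (bisectLeft h 0 pvBoundaries.length : Int) - 1
  if index < 0 then ""
  else
    match PySem.List.pyGet? interval_max_pas index with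
    | none => ""
    | some mp =>
      match PySem.List.pyGet? interval_max_pad index with
      | none => ""
      | some md =>
        if PySem.Dict.getD (PySem.Dict.mk value) "PPA" 0 ≥ mp ∨
           PySem.Dict.getD (PySem.Dict.mk value) "PPD" 0 ≥ md then "HAS" else "NORMAL"

-- ===== PRECONDITION & SPEC =====
-- the percentile bin of a height h > 0 (boundaries 5/10/25/50/75/90; 6 = above all)
def pvIdx (h : Int) : Nat :=
  if h ≤ 5 then 0 else if h ≤ 10 then 1 else if h ≤ 25 then 2 else if h ≤ 50 then 3
  else if h ≤ 75 then 4 else if h ≤ 90 then 5 else 6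

-- Pre_ excludes exactly the inputs where A raises: KeyError ('HEIGHT' missing; 'PPA' missing
-- while a classification happens, i.e. height > 0; 'PPD' missing when the 'PPA' disjunct is
-- false, since Python's 'or' short-circuits) and IndexError (the selected bin index not
-- smaller than the length of either max list).
def Pre_classify_ppa (value : List (String × Int)) (interval_max_pas : List Int) (interval_max_pad : List Int) : Prop :=
  ((PySem.Dict.mk value).get? "HEIGHT").isSome = true ∧
  ((PySem.Dict.mk value).getD "HEIGHT" 0 ≤ 0 ∨
    (((PySem.Dict.mk value).get? "PPA").isSome = true ∧
     pvIdx ((PySem.Dict.mk value).getD "HEIGHT" 0) < interval_max_pas.length ∧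
     pvIdx ((PySem.Dict.mk value).getD "HEIGHT" 0) < interval_max_pad.length ∧
     (((PySem.Dict.mk value).get? "PPD").isSome = true ∨
      (PySem.Dict.mk value).getD "PPA" 0 ≥
        interval_max_pas.getD (pvIdx ((PySem.Dict.mk value).getD "HEIGHT" 0)) 0)))
instance (value : List (String × Int)) (interval_max_pas : List Int) (interval_max_pad : List Int) : Decidable (Pre_classify_ppa value interval_max_pas interval_max_pad) := by unfold Pre_classify_ppa; infer_instance

def pvWitness_classify_ppa : (List (String × Int)) × List Int × List Int :=
  ([("HEIGHT", 3), ("PPA", 100), ("PPD", 60)], [120], [80])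

def Spec_classify_ppa (value : List (String × Int)) (interval_max_pas : List Int) (interval_max_pad : List Int) (out : String) : Prop := out = classify_ppa_alt value interval_max_pas interval_max_pad
instance (value : List (String × Int)) (interval_max_pas : List Int) (interval_max_pad : List Int) (out : String) : Decidable (Spec_classify_ppa value interval_max_pas interval_max_pad out) := by unfold Spec_classify_ppa; infer_instance

-- ===== CLAIM (what is proved, stated in full; the proofs are below) =====
def Claim_equal_classify_ppa : Prop := ∀ (value : List (String × Int)) (interval_max_pas : List Int) (interval_max_pad : List Int), Dom_classify_ppa value interval_max_pas interval_max_pad → Pre_classify_ppa value interval_max_pas interval_max_pad → Spec_classify_ppa value interval_max_pas interval_max_pad (classify_ppa value interval_max_pas interval_max_pad)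

-- ===== LEMMAS AND PROOFS =====
-- full evaluation of the binary search over the 7 fixed boundaries as a function of h
lemma bisectLeft_eval (h : Int) :
    bisectLeft h 0 pvBoundaries.length = if h ≤ 0 then 0 else pvIdx h + 1 := by
  simp [bisectLeft, blGo, pvBoundaries, pvIdx, List.getD]
  split_ifs <;> omega

lemma foldA_eval (h : Int) :
    intervalPercentil.foldl
      (fun (s : Int × Int × Int) interval =>
        (if interval.1 < h ∧ h ≤ interval.2 then s.2.1 else s.1, s.2.1 + 1, interval.2))
      (-1, 0, 0)
    = ((if 0 < h ∧ h ≤ 90 then (pvIdx h : Int) else -1), 6, 90) := by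
  simp only [intervalPercentil, List.foldl, pvIdx, Prod.mk.injEq]
  refine ⟨?_, by omega, trivial⟩
  split_ifs <;> omega

-- ===== VERDICT (by name: the statement is the Claim_ definition above) =====
theorem classify_ppa_spec : Claim_equal_classify_ppa := by
  intro value pas pad _hdom hpre
  unfold Spec_classify_ppa classify_ppa classify_ppa_alt
  obtain ⟨_hh, hrest⟩ := hpre
  simp only []
  rw [foldA_eval, bisectLeft_eval]
  set h := PySem.Dict.getD (PySem.Dict.mk value) "HEIGHT" 0 with hh
  by_cases h0 : h ≤ 0
  · simp [h0, show ¬ (0 < h ∧ h ≤ 90) from by omega, show ¬ h > (90:Int) by omega]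
  · have hp : (0:Int) < h := by omega
    rcases hrest with h0' | ⟨_, hlen1, hlen2, _⟩
    · omega
    by_cases h90 : h ≤ 90
    · have hpas : pas[pvIdx h]? = some pas[pvIdx h] := List.getElem?_eq_getElem hlen1
      have hpad : pad[pvIdx h]? = some pad[pvIdx h] := List.getElem?_eq_getElem hlen2
      simp [classifyA, h0, show (0 < h ∧ h ≤ 90) from ⟨hp, h90⟩, show ¬ h > (90:Int) by omega,
        show (0:Int) ≤ (pvIdx h : Int) by omega, add_sub_cancel_right,
        show ¬ ((pvIdx h : Int) < 0) by omega, hpas, hpad]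
    · have h6 : pvIdx h = 6 := by unfold pvIdx; split_ifs <;> omega
      have hpas : pas[(6:Nat)]? = some pas[6] := List.getElem?_eq_getElem (by omega)
      have hpad : pad[(6:Nat)]? = some pad[6] := List.getElem?_eq_getElem (by omega)
      have hp6 : PySem.List.pyGet? pas 6 = some pas[6] := by
        rw [show ((6:Int)) = ((6:Nat):Int) from rfl, PySem.List.pyGet?_natCast, hpas]
      have hd6 : PySem.List.pyGet? pad 6 = some pad[6] := by
        rw [show ((6:Int)) = ((6:Nat):Int) from rfl, PySem.List.pyGet?_natCast, hpad]
      simp [classifyA, h0, h6, show h > (90:Int) by omega, hp6, hd6]
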